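-- pv_equiv track=rewrite | github.com/aplassard/successat | src/successat/benchmarks/livebench.py | _infer_completion_indent
-- ===== SOURCE A (Python) =====
-- def _infer_completion_indent(starter: str) -> str:
--     for line in reversed(starter.splitlines()):
--         if not line:
--             continue
--         whitespace = line[: len(line) - len(line.lstrip(" 	"))]
--         stripped = line.strip()
--         if not stripped:
--             if whitespace:
--                 return whitespace
--             continue
--         if stripped.endswith(":"):
--             return whitespace + "    "
--         return whitespace
--     return ""
-- ===== SOURCE B (Python) =====
-- _BREAKS = "\n\r\v\f\x1c\x1d\x1e\x85\u2028\u2029"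
--
-- def _infer_completion_indent(starter: str) -> str:
--     # no splitlines: scan the raw characters from the end, skip line breaks,
--     # then delimit the last line directly
--     rev = starter[::-1]
--     j = 0
--     while j < len(rev) and rev[j] in _BREAKS:
--         j += 1
--     if j == len(rev):
--         return ""
--     k = j
--     while k < len(rev) and rev[k] not in _BREAKS:
--         k += 1
--     line = rev[j:k][::-1]
--     whitespace = line[: len(line) - len(line.lstrip(" \t"))]
--     stripped = line.strip()
--     if not stripped:
--         return whitespace
--     if stripped.endswith(":"):
--         return whitespace + "    "
--     return whitespace
-- ===== Notes on version B (the rewrite author's own statement) =====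
-- stated objective: alternative
-- what changed: B never calls splitlines and builds no list of lines: it scans the raw string backwards with two index loops (skip trailing line-break characters, then delimit the last non-empty line) and judges that one slice, instead of A's iteration over reversed(splitlines()) with early returns.
import Mathlib
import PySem

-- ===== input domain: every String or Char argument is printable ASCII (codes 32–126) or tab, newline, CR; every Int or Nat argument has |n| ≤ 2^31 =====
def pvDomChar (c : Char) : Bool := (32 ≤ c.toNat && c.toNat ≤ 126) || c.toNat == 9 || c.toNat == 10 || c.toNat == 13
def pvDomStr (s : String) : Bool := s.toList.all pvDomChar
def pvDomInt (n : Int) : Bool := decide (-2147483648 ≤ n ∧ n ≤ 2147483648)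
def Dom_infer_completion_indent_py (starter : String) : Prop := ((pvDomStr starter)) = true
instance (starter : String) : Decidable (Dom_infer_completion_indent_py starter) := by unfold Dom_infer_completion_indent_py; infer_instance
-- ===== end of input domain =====

-- B drops splitlines entirely: it scans the raw characters backwards (skip trailing
-- line breaks, delimit the last non-empty line) and judges that one slice
-- (objective: alternative traversal, same cost).

-- ===== PORT A =====
-- hand port of Python's line.lstrip(" \t") (PySem has no left-strip with a char-set
-- argument): drops exactly the leading ' ' and '\t' characters, as CPython does — exact
def pvLstripSpTab (s : String) : String :=
  String.ofList (s.toList.dropWhile (fun c => c == ' ' || c == '\t'))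

-- the subexpression line[: len(line) - len(line.lstrip(" \t"))] both Pythons contain
def pvLineIndent (line : String) : String :=
  PySem.Str.slice line none
    (some ((PySem.Str.len line : Int) - (PySem.Str.len (pvLstripSpTab line) : Int)))

-- A's for-loop over reversed(starter.splitlines()) with its early returns
def pvALoop : List String → String
  | [] => ""
  | line :: rest =>
    if line = "" then pvALoop rest
    else
      let whitespace := pvLineIndent line
      let stripped := PySem.Str.strip line
      if stripped = "" then
        (if whitespace ≠ "" then whitespace else pvALoop rest)
      else if PySem.Str.endswith stripped ":" then whitespace ++ "    "
      else whitespace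

def infer_completion_indent_py (starter : String) : String :=
  pvALoop (PySem.Str.splitlines starter).reverse

-- ===== PORT B =====
-- Source B's `c in _BREAKS`: the line-break characters of str.splitlines (same set as PySem)
def pvIsBreak (c : Char) : Bool :=
  decide (c.toNat = 10) || decide (c.toNat = 13) || decide (c.toNat = 11) ||
  decide (c.toNat = 12) || decide (c.toNat = 28) || decide (c.toNat = 29) ||
  decide (c.toNat = 30) || decide (c.toNat = 133) || decide (c.toNat = 8232) ||
  decide (c.toNat = 8233)

-- Source B's first while loop (advance j over break characters): the suffix of rev from j
def pvDropBreaks : List Char → List Char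
  | [] => []
  | c :: rest => if pvIsBreak c then pvDropBreaks rest else c :: rest

-- Source B's second while loop (advance k over non-break characters): the slice rev[j:k]
def pvTakeLine : List Char → List Char
  | [] => []
  | c :: rest => if pvIsBreak c then [] else c :: pvTakeLine rest

def infer_completion_indent_py_alt (starter : String) : String :=
  let rev := starter.toList.reverse
  let t := pvDropBreaks rev
  if t.isEmpty then ""
  else
    let line := String.ofList (pvTakeLine t).reverse
    let whitespace := pvLineIndent line
    let stripped := PySem.Str.strip line
    if stripped = "" then whitespace
    else if PySem.Str.endswith stripped ":" then whitespace ++ "    "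
    else whitespace

-- ===== PRECONDITION & SPEC =====
def Spec_infer_completion_indent_py (starter : String) (out : String) : Prop := out = infer_completion_indent_py_alt starter
instance (starter : String) (out : String) : Decidable (Spec_infer_completion_indent_py starter out) := by unfold Spec_infer_completion_indent_py; infer_instance

-- ===== CLAIM (what is proved, stated in full; the proofs are below) =====
def Claim_equal_infer_completion_indent_py : Prop := ∀ (starter : String), Dom_infer_completion_indent_py starter → Spec_infer_completion_indent_py starter (infer_completion_indent_py starter)

-- ===== LEMMAS AND PROOFS =====

-- judging one candidate last line, as a function of that line
def pvBTail (last : String) : String :=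
  if last = "" then ""
  else
    let indent := pvLineIndent last
    let stripped := PySem.Str.strip last
    if stripped = "" then indent
    else if PySem.Str.endswith stripped ":" then indent ++ "    "
    else indent

-- keep-last-non-empty folds, over strings and over char lists
def pvKeepS (L : List String) (i : String) : String :=
  L.foldl (fun acc line => if line = "" then acc else line) i

def pvKeepC (L : List (List Char)) (i : List Char) : List Char :=
  L.foldl (fun acc line => if line.isEmpty then acc else line) i

-- the indent slice is the leading run of spaces/tabs
theorem pvLineIndent_eq (line : String) :
    pvLineIndent line =
      String.ofList (line.toList.takeWhile (fun c => c == ' ' || c == '\t')) := by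
  have hsum := congrArg List.length
    (List.takeWhile_append_dropWhile (p := fun c => c == ' ' || c == '\t') (l := line.toList))
  rw [List.length_append] at hsum
  have hb : (PySem.Str.len line : Int) - (PySem.Str.len (pvLstripSpTab line) : Int) =
      ((line.toList.takeWhile (fun c => c == ' ' || c == '\t')).length : Int) := by
    rw [PySem.Str.len_eq, PySem.Str.len_eq]
    simp only [pvLstripSpTab, String.toList_ofList]
    omega
  apply String.toList_injective
  rw [pvLineIndent, hb]
  have hpre := (List.takeWhile_prefix (l := line.toList) (p := fun c => c == ' ' || c == '\t'))
  simp [PySem.Str.slice, PySem.Chars.slice_eq_listSlice, PySem.List.slice_to_natCast]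
  exact (List.prefix_iff_eq_take.mp hpre).symm

-- stripped == "" means every character of the line is Python whitespace
theorem pvStrip_empty (line : String) (h : PySem.Str.strip line = "") :
    ∀ c ∈ line.toList, PySem.Chars.isspace c = true := by
  have h' : PySem.Chars.strip line.toList = [] := by
    have := congrArg String.toList h
    simpa [PySem.Str.strip] using this
  intro c hc
  rw [PySem.Chars.strip, PySem.Chars.rstrip] at h'
  have h2 : ∀ x ∈ (PySem.Chars.lstrip line.toList).reverse, PySem.Chars.isspace x = true := by
    have : List.dropWhile PySem.Chars.isspace (PySem.Chars.lstrip line.toList).reverse = [] := by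
      simpa using h'
    exact List.dropWhile_eq_nil_iff.mp this
  have h3 : ∀ x ∈ PySem.Chars.lstrip line.toList, PySem.Chars.isspace x = true := by
    intro x hx; exact h2 x (by simpa using hx)
  rcases List.mem_append.mp (by
      rw [List.takeWhile_append_dropWhile (p := PySem.Chars.isspace)]; exact hc :
      c ∈ line.toList.takeWhile PySem.Chars.isspace ++
          line.toList.dropWhile PySem.Chars.isspace) with h4 | h4
  · exact List.mem_takeWhile_imp h4
  · exact h3 c (by simpa [PySem.Chars.lstrip] using h4)

-- splitlines.go invariant: characters of every produced line come from the input
-- (or the accumulators) and are never line-break characters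
theorem pvSplitGo_inv (isB : Char → Bool) (p : Char → Bool) :
    ∀ (s cur : List Char) (acc : List (List Char)),
      (∀ c ∈ s, p c = true) →
      (∀ c ∈ cur, p c = true ∧ isB c = false) →
      (∀ l ∈ acc, ∀ c ∈ l, p c = true ∧ isB c = false) →
      ∀ l ∈ PySem.Chars.splitlines.go isB s cur acc, ∀ c ∈ l, p c = true ∧ isB c = false := by
  intro s cur acc
  induction s, cur, acc using PySem.Chars.splitlines.go.induct (isB := isB) with
  | case1 cur acc hcur =>
    intro _ h2 h3
    rw [PySem.Chars.splitlines.go.eq_def]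
    simp only [hcur, if_pos]
    intro l hl
    exact h3 l (by simpa using hl)
  | case2 cur acc hcur =>
    intro _ h2 h3
    rw [PySem.Chars.splitlines.go.eq_def]
    simp only [hcur, if_neg, Bool.false_eq_true, not_false_iff]
    intro l hl
    rcases List.mem_reverse.mp hl with hl'
    rcases List.mem_cons.mp hl' with h | h
    · subst h; intro c hc; exact h2 c (by simpa using hc)
    · exact h3 l h
  | case3 rest cur acc ih =>
    intro h1 h2 h3
    rw [PySem.Chars.splitlines.go.eq_def]
    exact ih (fun c hc => h1 c (by simp [hc])) (by simp)
      (by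
        intro l hl c hc
        rcases List.mem_cons.mp hl with h | h
        · subst h; exact h2 c (by simpa using hc)
        · exact h3 l h c hc)
  | case4 c rest cur acc hne hb ih =>
    intro h1 h2 h3
    rw [PySem.Chars.splitlines.go.eq_def]
    split
    · simp_all
    · next rest' heq =>
      exfalso
      have h1' := (List.cons.injEq _ _ _ _ ▸ heq)
      exact hne rest' h1'.1 h1'.2
    · next c' rest' heq =>
      have h1' := (List.cons.injEq _ _ _ _ ▸ heq)
      obtain ⟨rfl, rfl⟩ := h1'
      rw [if_pos hb]
      exact ih (fun x hx => h1 x (by simp [hx])) (by simp)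
        (by
          intro l hl x hx
          rcases List.mem_cons.mp hl with h | h
          · subst h; exact h2 x (by simpa using hx)
          · exact h3 l h x hx)
  | case5 c rest cur acc hne hb ih =>
    intro h1 h2 h3
    rw [PySem.Chars.splitlines.go.eq_def]
    split
    · simp_all
    · next rest' heq =>
      exfalso
      have h1' := (List.cons.injEq _ _ _ _ ▸ heq)
      exact hne rest' h1'.1 h1'.2
    · next c' rest' heq =>
      have h1' := (List.cons.injEq _ _ _ _ ▸ heq)
      obtain ⟨rfl, rfl⟩ := h1'
      rw [if_neg hb]
      exact ih (fun x hx => h1 x (by simp [hx]))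
        (by
          intro x hx
          rcases List.mem_cons.mp hx with h | h
          · subst h; exact ⟨h1 _ (by simp), by simpa using hb⟩
          · exact h2 x h)
        h3

-- a Dom character that survives splitlines and is Python whitespace is ' ' or '\t'
theorem pvChar_st (c : Char) (hdom : pvDomChar c = true)
    (hb : pvIsBreak c = false)
    (hsp : PySem.Chars.isspace c = true) : (c == ' ' || c == '\t') = true := by
  have hn : c.toNat = 32 ∨ c.toNat = 9 := by
    simp [pvDomChar] at hdom
    simp [pvIsBreak] at hb
    simp [PySem.Chars.isspace] at hsp
    omega
  have hchar : c = ' ' ∨ c = '\t' := by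
    rcases hn with h | h
    · left; apply Char.ext; unfold Char.toNat at h; exact UInt32.toNat_inj.mp (h.trans rfl)
    · right; apply Char.ext; unfold Char.toNat at h; exact UInt32.toNat_inj.mp (h.trans rfl)
  rcases hchar with h | h <;> simp [h]

-- on Dom, a non-empty line of splitlines whose strip() is empty has a non-empty indent
theorem pvLine_good (starter : String) (hdom : Dom_infer_completion_indent_py starter) :
    ∀ line ∈ PySem.Str.splitlines starter,
      line ≠ "" → PySem.Str.strip line = "" → pvLineIndent line ≠ "" := by
  intro line hline hne hstrip
  have hmem : line.toList ∈ PySem.Chars.splitlines starter.toList := by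
    have hmap : line.toList ∈ (PySem.Str.splitlines starter).map String.toList :=
      List.mem_map_of_mem hline
    rwa [PySem.Str.splitlines_map_toList] at hmap
  have hchars : ∀ c ∈ line.toList, pvDomChar c = true ∧ pvIsBreak c = false := by
    have hd : ∀ c ∈ starter.toList, pvDomChar c = true := by
      have hdom' := hdom; unfold Dom_infer_completion_indent_py pvDomStr at hdom'
      exact fun c hc => List.all_eq_true.mp hdom' c hc
    have hinv := pvSplitGo_inv pvIsBreak
      pvDomChar starter.toList [] [] hd (by simp) (by simp)
    intro c hc
    exact hinv line.toList hmem c hc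
  have hsp := pvStrip_empty line hstrip
  have hall : ∀ c ∈ line.toList, (c == ' ' || c == '\t') = true := by
    intro c hc
    exact pvChar_st c (hchars c hc).1 (hchars c hc).2 (hsp c hc)
  have htake : line.toList.takeWhile (fun c => c == ' ' || c == '\t') = line.toList :=
    List.takeWhile_eq_self_iff.mpr hall
  rw [pvLineIndent_eq, htake]
  simpa using hne

-- the reverse early-exit scan equals "last non-empty line, judged once"
theorem pvLoop_eq (L : List String)
    (H : ∀ line ∈ L, line ≠ "" → PySem.Str.strip line = "" → pvLineIndent line ≠ "") :
    pvALoop L.reverse = pvBTail (pvKeepS L "") := by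
  induction L using List.reverseRecOn with
  | nil => simp [pvALoop, pvBTail, pvKeepS]
  | append_singleton L x ih =>
    have hH : ∀ line ∈ L, line ≠ "" → PySem.Str.strip line = "" → pvLineIndent line ≠ "" :=
      fun line hl => H line (by simp [hl])
    rw [List.reverse_append]
    unfold pvKeepS
    rw [List.foldl_append]
    simp only [List.reverse_singleton, List.singleton_append, List.foldl_cons, List.foldl_nil]
    by_cases hx : x = ""
    · simp [pvALoop, hx, ih hH, pvKeepS]
    · have hgood := H x (by simp) hx
      rw [if_neg hx]
      simp only [pvALoop, if_neg hx, pvBTail]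
      by_cases hs : PySem.Str.strip x = ""
      · simp [hs, hgood hs]
      · simp [hs]

-- String.ofList l is empty exactly when l is
theorem pvOfList_empty (l : List Char) : (String.ofList l = "") ↔ l = [] := by
  constructor
  · intro h; have := congrArg String.toList h; simpa using this
  · intro h; subst h; rfl

-- the string fold is the char-list fold under String.ofList
theorem pvKeep_map (L : List (List Char)) :
    ∀ a, pvKeepS (L.map String.ofList) (String.ofList a) = String.ofList (pvKeepC L a) := by
  induction L with
  | nil => intro a; rfl
  | cons l rest ih =>
    intro a
    unfold pvKeepS pvKeepC
    simp only [List.map_cons, List.foldl_cons]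
    by_cases h : l = []
    · subst h
      rw [if_pos (show String.ofList ([] : List Char) = "" from rfl),
          if_pos (show ([] : List Char).isEmpty = true from rfl)]
      exact ih a
    · rw [if_neg (fun hh => h ((pvOfList_empty l).mp hh)), if_neg (by simpa using h)]
      exact ih l

-- dropWhile-style facts about the two scanning loops of B
theorem pvDropBreaks_no (l : List Char) (h : ∀ c ∈ l, pvIsBreak c = false) :
    pvDropBreaks l = l := by
  cases l with
  | nil => rfl
  | cons c rest => simp [pvDropBreaks, h c (by simp)]

theorem pvTakeLine_no (l : List Char) (h : ∀ c ∈ l, pvIsBreak c = false) :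
    pvTakeLine l = l := by
  induction l with
  | nil => rfl
  | cons c rest ih =>
    simp [pvTakeLine, h c (by simp)]
    exact ih (fun x hx => h x (by simp [hx]))

theorem pvDropBreaks_append (a b : List Char) :
    pvDropBreaks (a ++ b) =
      if (pvDropBreaks a).isEmpty then pvDropBreaks b else pvDropBreaks a ++ b := by
  induction a with
  | nil => simp [pvDropBreaks]
  | cons c rest ih =>
    by_cases h : pvIsBreak c
    · simpa [pvDropBreaks, h] using ih
    · simp [pvDropBreaks, h]

theorem pvTakeLine_append_break (a : List Char) (c : Char) (y : List Char)
    (hb : pvIsBreak c = true) : pvTakeLine (a ++ c :: y) = pvTakeLine a := by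
  induction a with
  | nil => simp [pvTakeLine, hb]
  | cons d rest ih =>
    by_cases h : pvIsBreak d
    · simp [pvTakeLine, h]
    · simp [pvTakeLine, h, ih]

-- head of pvDropBreaks output is a non-break, so pvTakeLine of it is empty iff it is
theorem pvTakeDrop_empty (l : List Char) :
    (pvTakeLine (pvDropBreaks l)).isEmpty = (pvDropBreaks l).isEmpty := by
  induction l with
  | nil => rfl
  | cons c rest ih =>
    by_cases h : pvIsBreak c
    · simpa [pvDropBreaks, h] using ih
    · simp [pvDropBreaks, pvTakeLine, h]

-- dropBreaks of an all-break list is empty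
theorem pvDropBreaks_all (l : List Char) (h : ∀ c ∈ l, pvIsBreak c = true) :
    pvDropBreaks l = [] := by
  induction l with
  | nil => rfl
  | cons c rest ih =>
    simp [pvDropBreaks, h c (by simp)]
    exact ih (fun x hx => h x (by simp [hx]))

-- keep-last over a snoc
theorem pvKeepC_snoc (acc : List (List Char)) (x : List Char) :
    pvKeepC (acc ++ [x]) [] = if x.isEmpty = true then pvKeepC acc [] else x := by
  unfold pvKeepC; rw [List.foldl_append]; rfl

-- the backward scan jumps over an emitted break sequence
theorem pvScan_skip (a bs cur : List Char) (hbs : ∀ c ∈ bs, pvIsBreak c = true)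
    (hbs' : bs ≠ []) (hcur : ∀ c ∈ cur, pvIsBreak c = false) :
    pvTakeLine (pvDropBreaks (a ++ (bs ++ cur))) =
      if (pvTakeLine (pvDropBreaks a)).isEmpty = true then cur
      else pvTakeLine (pvDropBreaks a) := by
  rw [pvTakeDrop_empty, pvDropBreaks_append]
  by_cases h : (pvDropBreaks a).isEmpty = true
  · rw [if_pos h, if_pos h, pvDropBreaks_append, pvDropBreaks_all bs hbs]
    simp only [List.isEmpty_nil, if_pos]
    rw [pvDropBreaks_no cur hcur, pvTakeLine_no cur hcur]
  · rw [if_neg h, if_neg h]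
    cases bs with
    | nil => exact absurd rfl hbs'
    | cons b bs' =>
      rw [show (b :: bs') ++ cur = b :: (bs' ++ cur) from rfl,
          pvTakeLine_append_break _ b _ (hbs b (by simp))]

-- the two reduction equations of splitlines.go actually used below
theorem pvGo_crlf (rest cur : List Char) (acc : List (List Char)) :
    PySem.Chars.splitlines.go pvIsBreak ('\x0d' :: '\n' :: rest) cur acc =
      PySem.Chars.splitlines.go pvIsBreak rest [] (cur.reverse :: acc) := rfl

theorem pvGo_cons (c : Char) (rest cur : List Char) (acc : List (List Char))
    (hne : ∀ r', c :: rest = '\x0d' :: '\n' :: r' → False) :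
    PySem.Chars.splitlines.go pvIsBreak (c :: rest) cur acc =
      if pvIsBreak c = true then
        PySem.Chars.splitlines.go pvIsBreak rest [] (cur.reverse :: acc)
      else PySem.Chars.splitlines.go pvIsBreak rest (c :: cur) acc := by
  rw [PySem.Chars.splitlines.go.eq_def]
  split
  · rename_i heq
    exact absurd heq (by simp)
  · rename_i r' heq
    exact absurd heq (fun h => hne r' h)
  · rename_i c' rest' hfn heq
    have h1' := (List.cons.injEq _ _ _ _ ▸ heq)
    obtain ⟨rfl, rfl⟩ := h1'
    rfl

-- the backward scan computes the last non-empty line of splitlines.go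
theorem pvGo_lastline : ∀ (s cur : List Char) (acc : List (List Char)),
    (∀ c ∈ cur, pvIsBreak c = false) →
    pvKeepC (PySem.Chars.splitlines.go pvIsBreak s cur acc) [] =
      (if (pvTakeLine (pvDropBreaks (s.reverse ++ cur))).isEmpty = true
       then pvKeepC acc.reverse []
       else (pvTakeLine (pvDropBreaks (s.reverse ++ cur))).reverse) := by
  intro s cur acc
  induction s, cur, acc using PySem.Chars.splitlines.go.induct (isB := pvIsBreak) with
  | case1 cur acc hc =>
    intro _
    rw [PySem.Chars.splitlines.go.eq_def]
    simp only [hc, if_pos]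
    have hcur0 : cur = [] := List.isEmpty_iff.mp hc
    subst hcur0
    simp [pvDropBreaks, pvTakeLine]
  | case2 cur acc hc =>
    intro hcur
    rw [PySem.Chars.splitlines.go.eq_def]
    simp only [hc, Bool.false_eq_true, if_neg, not_false_iff]
    rw [List.reverse_cons, pvKeepC_snoc]
    simp only [List.reverse_nil, List.nil_append]
    rw [pvDropBreaks_no cur hcur, pvTakeLine_no cur hcur]
    simp [hc]
  | case3 rest cur acc ih =>
    intro hcur
    rw [pvGo_crlf, ih (by simp)]
    have hlist : ('\x0d' :: '\n' :: rest).reverse ++ cur =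
        rest.reverse ++ (['\n', '\x0d'] ++ cur) := by simp
    rw [hlist, pvScan_skip _ _ _ (by intro x hx; simp at hx; rcases hx with rfl | rfl <;> rfl)
      (by simp) hcur]
    simp only [List.append_nil]
    by_cases hT : (pvTakeLine (pvDropBreaks rest.reverse)).isEmpty = true
    · rw [if_pos hT, List.reverse_cons, pvKeepC_snoc]
      simp [hT, List.isEmpty_reverse]
    · simp [hT]
  | case4 c rest cur acc hne hb ih =>
    intro hcur
    rw [pvGo_cons c rest cur acc (by
      intro r' h
      have h1' := (List.cons.injEq _ _ _ _ ▸ h)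
      exact hne r' h1'.1 h1'.2)]
    rw [if_pos hb, ih (by simp)]
    have hlist : (c :: rest).reverse ++ cur = rest.reverse ++ ([c] ++ cur) := by simp
    rw [hlist, pvScan_skip _ _ _ (by simpa using hb) (by simp) hcur]
    simp only [List.append_nil]
    by_cases hT : (pvTakeLine (pvDropBreaks rest.reverse)).isEmpty = true
    · rw [if_pos hT, List.reverse_cons, pvKeepC_snoc]
      simp [hT, List.isEmpty_reverse]
    · simp [hT]
  | case5 c rest cur acc hne hb ih =>
    intro hcur
    rw [pvGo_cons c rest cur acc (by
      intro r' h
      have h1' := (List.cons.injEq _ _ _ _ ▸ h)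
      exact hne r' h1'.1 h1'.2)]
    rw [if_neg (by simp [hb]), ih (by
      intro x hx
      rcases List.mem_cons.mp hx with h | h
      · subst h; simpa using hb
      · exact hcur x h)]
    have hlist : rest.reverse ++ (c :: cur) = (c :: rest).reverse ++ cur := by simp
    rw [hlist]

-- assemble: B equals "judge the last non-empty line of splitlines"
theorem pvAlt_eq (s : String) :
    infer_completion_indent_py_alt s = pvBTail (pvKeepS (PySem.Str.splitlines s) "") := by
  have hsplit : PySem.Str.splitlines s =
      (PySem.Chars.splitlines.go pvIsBreak s.toList [] []).map String.ofList := rfl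
  rw [hsplit, show ("" : String) = String.ofList [] from rfl, pvKeep_map,
      pvGo_lastline s.toList [] [] (by simp)]
  simp only [List.append_nil, List.reverse_nil]
  have key : (if (pvTakeLine (pvDropBreaks s.toList.reverse)).isEmpty = true
       then ([] : List Char)
       else (pvTakeLine (pvDropBreaks s.toList.reverse)).reverse) =
      (pvTakeLine (pvDropBreaks s.toList.reverse)).reverse := by
    split
    · next h => rw [List.isEmpty_iff.mp h]; rfl
    · rfl
  rw [show pvKeepC [] [] = ([] : List Char) from rfl, key]
  simp only [infer_completion_indent_py_alt, pvBTail]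
  have hiff : ((pvDropBreaks s.toList.reverse).isEmpty = true) ↔
      (String.ofList (pvTakeLine (pvDropBreaks s.toList.reverse)).reverse = "") := by
    rw [pvOfList_empty, List.reverse_eq_nil_iff, ← List.isEmpty_iff, pvTakeDrop_empty]
  by_cases h : (pvDropBreaks s.toList.reverse).isEmpty = true
  · rw [if_pos h, if_pos (hiff.mp h)]
  · rw [if_neg h, if_neg (fun hh => h (hiff.mpr hh))]

-- ===== VERDICT (by name: the statement is the Claim_ definition above) =====
theorem infer_completion_indent_py_spec : Claim_equal_infer_completion_indent_py := by
  intro starter hdom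
  unfold Spec_infer_completion_indent_py infer_completion_indent_py
  rw [pvAlt_eq]
  exact pvLoop_eq _ (pvLine_good starter hdom)
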